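-- pv_equiv track=rewrite | github.com/johnnykang101/evoforge | evoforge/core/ckse.py | _find_preceding_context
-- ===== SOURCE A (Python) =====
-- from typing import List, Dict, Any, Optional, Set, Tuple
--
-- def _find_preceding_context(trace: List[Dict[str, Any]], error_pattern: str, window: int = 2) -> str:
--     """Find what typically precedes an error."""
--     # Simplified: return common preceding module
--     error_indices = [i for i, e in enumerate(trace) if str(e.get("error", "")) in error_pattern]
--     if not error_indices:
--         return "unknown context"
--
--     preceding = []
--     for idx in error_indices:
--         if idx > 0:
--             for i in range(max(0, idx-window), idx):
--                 preceding.append(trace[i].get("module", "?"))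
--     if not preceding:
--         return "start of execution"
--
--     from collections import Counter
--     common = Counter(preceding).most_common(1)[0]
--     return f"module '{common[0]}'"
-- ===== SOURCE B (Python) =====
-- def _find_preceding_context(trace, error_pattern, window=2):
--     """Single pass with a sliding deque of the last `window` module names."""
--     from collections import Counter, deque
--     win = deque(maxlen=max(window, 0))
--     counts = Counter()
--     matched = False
--     for e in trace:
--         if str(e.get("error", "")) in error_pattern:
--             matched = True
--             counts.update(win)
--         win.append(e.get("module", "?"))
--     if not matched:
--         return "unknown context"
--     if not counts:
--         return "start of execution"
--     return f"module '{counts.most_common(1)[0][0]}'"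
-- ===== Notes on version B (the rewrite author's own statement) =====
-- stated objective: alternative
-- what changed: Replaced the two-phase index scan (collect matching indices, then re-index the trace with nested range loops to build the preceding list) by a single pass that maintains a sliding deque of the last `window` module names and updates a running Counter in place whenever an element's error matches.
import Mathlib
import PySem

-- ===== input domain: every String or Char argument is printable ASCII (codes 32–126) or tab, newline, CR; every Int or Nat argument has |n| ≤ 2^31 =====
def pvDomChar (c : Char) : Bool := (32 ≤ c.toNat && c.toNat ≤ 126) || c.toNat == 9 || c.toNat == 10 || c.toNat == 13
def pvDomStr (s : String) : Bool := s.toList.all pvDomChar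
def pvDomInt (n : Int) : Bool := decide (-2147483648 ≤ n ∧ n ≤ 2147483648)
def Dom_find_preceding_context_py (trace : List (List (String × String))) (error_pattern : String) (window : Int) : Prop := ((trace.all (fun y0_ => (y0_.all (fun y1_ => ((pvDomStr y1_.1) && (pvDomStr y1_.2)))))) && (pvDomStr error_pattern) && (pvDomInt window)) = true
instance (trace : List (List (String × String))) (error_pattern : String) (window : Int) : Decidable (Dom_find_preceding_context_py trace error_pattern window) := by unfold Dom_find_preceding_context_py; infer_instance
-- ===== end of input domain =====

-- ===== PORT A =====
-- B re-implements A's two-phase index scan as a single pass with a sliding window; return values proved equal.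
-- shared primitive: Python's e.get(k, default) on a dict given as an association list
def dget (e : List (String × String)) (k d : String) : String :=
  (PySem.Dict.mk e).getD k d

-- Counter(xs).most_common(1)[0][0]: the first key holding the maximal count (items are in
-- first-insertion order, heapq.nlargest/sorted are stable); "" only on an empty Counter (unreachable).
def mostCommonKey (items : List (String × Int)) : String :=
  match items with
  | [] => ""
  | p :: rest => (rest.foldl (fun best q => if best.2 < q.2 then q else best) p).1

def find_preceding_context_py (trace : List (List (String × String))) (error_pattern : String) (window : Int) : String :=
  let error_indices := ((PySem.List.enumerate trace).filter
      (fun p => PySem.Str.isIn (dget p.2 "error" "") error_pattern)).map (fun p => p.1)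
  if error_indices.isEmpty then "unknown context"
  else
    let preceding := error_indices.foldl (fun acc idx =>
      if idx > 0 then
        acc ++ (PySem.List.pyRange (max 0 (idx - window)) idx).map
          (fun i => dget (PySem.List.pyGetD trace i []) "module" "?")
      else acc) []
    if preceding.isEmpty then "start of execution"
    else "module '" ++ mostCommonKey (PySem.Dict.counter preceding).items ++ "'"

-- ===== PORT B =====
-- one loop step of Source B: match test + Counter.update(win), then win.append under deque's maxlen
def bStep (error_pattern : String) (maxlen : Nat)
    (st : List String × PySem.Dict String Int × Bool) (e : List (String × String)) :
    List String × PySem.Dict String Int × Bool :=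
  let win := st.1
  let counts := st.2.1
  let matched := st.2.2
  let flag := PySem.Str.isIn (dget e "error" "") error_pattern
  let counts := if flag then win.foldl (fun d x => d.modify x 0 (· + 1)) counts else counts
  let matched := matched || flag
  let win := win ++ [dget e "module" "?"]
  (win.drop (win.length - maxlen), counts, matched)

def find_preceding_context_py_alt (trace : List (List (String × String))) (error_pattern : String) (window : Int) : String :=
  let maxlen := (max window 0).toNat
  let st := trace.foldl (bStep error_pattern maxlen) ([], PySem.Dict.empty, false)
  if !st.2.2 then "unknown context"
  else if st.2.1.items.isEmpty then "start of execution"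
  else "module '" ++ mostCommonKey st.2.1.items ++ "'"

-- ===== PRECONDITION & SPEC =====
def Spec_find_preceding_context_py (trace : List (List (String × String))) (error_pattern : String) (window : Int) (out : String) : Prop := out = find_preceding_context_py_alt trace error_pattern window
instance (trace : List (List (String × String))) (error_pattern : String) (window : Int) (out : String) : Decidable (Spec_find_preceding_context_py trace error_pattern window out) := by unfold Spec_find_preceding_context_py; infer_instance

-- ===== CLAIM (what is proved, stated in full; the proofs are below) =====
def Claim_equal_find_preceding_context_py : Prop := ∀ (trace : List (List (String × String))) (error_pattern : String) (window : Int), Dom_find_preceding_context_py trace error_pattern window → Spec_find_preceding_context_py trace error_pattern window (find_preceding_context_py trace error_pattern window)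

-- ===== LEMMAS AND PROOFS =====

def lastN (n : Nat) (l : List String) : List String := l.drop (l.length - n)


theorem pyRange_nil {a b : Int} (h : b ≤ a) : PySem.List.pyRange a b = [] := by
  rw [List.eq_nil_iff_forall_not_mem]
  intro x hx
  rw [PySem.List.mem_pyRange_one] at hx
  omega


theorem lastN_snoc (m : Nat) (s : List String) (x : String) :
    lastN m (lastN m s ++ [x]) = lastN m (s ++ [x]) := by
  unfold lastN
  rcases Nat.eq_zero_or_pos m with hm | hm
  · subst hm
    simp only [Nat.sub_zero, List.drop_length, List.nil_append, List.length_append,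
      List.length_cons, List.length_nil]
    rw [List.drop_eq_nil_of_le (by simp), List.drop_eq_nil_of_le (by simp)]
  · simp only [List.length_append, List.length_drop, List.length_cons, List.length_nil]
    rw [List.drop_append_of_le_length (by simp; omega), List.drop_drop,
      List.drop_append_of_le_length (by omega)]
    congr 2
    omega


theorem map_pyRange_drop_take {E : Type} (T : List E) (g : E → String) (d : E) :
    ∀ (b a : Nat), a ≤ b → b ≤ T.length →
    (PySem.List.pyRange ↑a ↑b).map (fun i => g (PySem.List.pyGetD T i d)) =
      ((T.take b).drop a).map g := by
  intro b
  induction b with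
  | zero =>
    intro a h1 _
    rw [pyRange_nil (by omega)]
    simp
  | succ b ih =>
    intro a h1 h2
    rcases Nat.lt_or_ge a (b + 1) with h | h
    · have hab : a ≤ b := by omega
      rw [show ((b + 1 : Nat) : Int) = (b : Int) + 1 by push_cast; ring,
        PySem.List.pyRange_one_succ_right (by exact_mod_cast hab), List.map_append,
        ih a hab (by omega)]
      have hb : b < T.length := by omega
      rw [List.take_add_one, List.getElem?_eq_getElem hb]
      simp only [Option.toList_some]
      rw [List.drop_append_of_le_length (by simp; omega), List.map_append]
      congr 1
      simp only [List.map_cons, List.map_nil]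
      congr 1
      rw [PySem.List.pyGetD_eq_getElem T d (by positivity) (by exact_mod_cast hb)]
      simp
    · have : a = b + 1 := by omega
      subst this
      rw [pyRange_nil (by omega)]
      rw [List.drop_eq_nil_of_le (by simp)]
      simp


theorem window_eq {E : Type} (T : List E) (g : E → String) (d : E) (window : Int)
    (n : Nat) (hn : n ≤ T.length) :
    (if ((n : Int) > 0) then
        (PySem.List.pyRange (max 0 ((n : Int) - window)) ↑n).map (fun i => g (PySem.List.pyGetD T i d))
      else []) =
    lastN (max window 0).toNat ((T.take n).map g) := by
  rcases Nat.eq_zero_or_pos n with h0 | h0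
  · subst h0
    simp [lastN]
  · rw [if_pos (by exact_mod_cast h0)]
    by_cases hw : window ≤ 0
    · rw [pyRange_nil (by omega)]
      rw [show (max window 0).toNat = 0 by omega, lastN]
      rw [List.drop_eq_nil_of_le (by omega)]
      simp
    · push Not at hw
      have hmax : max 0 ((n : Int) - window) = ((n - window.toNat : Nat) : Int) := by omega
      rw [hmax, map_pyRange_drop_take T g d n _ (by omega) hn]
      rw [lastN, show (max window 0).toNat = window.toNat by omega]
      rw [List.length_map, List.length_take, List.map_drop, List.map_take]
      congr 1
      omega


def prec {E : Type} (flag : E → Bool) (md : E → String) (m : Nat) :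
    List String → List E → List String
  | _, [] => []
  | seen, e :: rest =>
      (if flag e then lastN m seen else []) ++ prec flag md m (seen ++ [md e]) rest


theorem foldA {E : Type} (flag : E → Bool) (md : E → String) (d : E) (window : Int) (T : List E) :
    ∀ (rest seen : List E), T = seen ++ rest →
    ((PySem.List.enumerate rest ↑seen.length).filter (fun p => flag p.2)).flatMap
        (fun p => if p.1 > 0 then
            (PySem.List.pyRange (max 0 (p.1 - window)) p.1).map (fun i => md (PySem.List.pyGetD T i d))
          else [])
      = prec flag md (max window 0).toNat (seen.map md) rest := by
  intro rest
  induction rest with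
  | nil => intro seen hT; simp [PySem.List.enumerate, prec]
  | cons e rest ih =>
    intro seen hT
    have hcast : ((seen.length : Int) + 1) = ((seen ++ [e]).length : Int) := by
      simp
    have hrec := ih (seen ++ [e]) (by simp [hT])
    have hn : seen.length ≤ T.length := by subst hT; simp
    have hwin := window_eq T md d window seen.length hn
    have htake : T.take seen.length = seen := by
      subst hT; exact List.take_left
    rw [htake] at hwin
    simp only [PySem.List.enumerate, prec, hcast]
    by_cases hf : flag e
    · rw [List.filter_cons_of_pos (by simp [hf]), List.flatMap_cons, hrec,
        if_pos hf]
      congr 1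
      simpa using hwin
    · rw [List.filter_cons_of_neg (by simp [hf]), hrec, if_neg hf]
      simp


theorem foldB (pat : String) (m : Nat) :
    ∀ (rest : List (List (String × String))) (seenM : List String)
      (counts : PySem.Dict String Int) (matched : Bool),
    rest.foldl (bStep pat m) (lastN m seenM, counts, matched) =
      (lastN m (seenM ++ rest.map (fun e => dget e "module" "?")),
       (prec (fun e => PySem.Str.isIn (dget e "error" "") pat) (fun e => dget e "module" "?") m seenM rest).foldl
         (fun d x => d.modify x 0 (· + 1)) counts,
       matched || rest.any (fun e => PySem.Str.isIn (dget e "error" "") pat)) := by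
  intro rest
  induction rest with
  | nil => intro seenM counts matched; simp [prec]
  | cons e rest ih =>
    intro seenM counts matched
    rw [List.foldl_cons]
    have hstep : bStep pat m (lastN m seenM, counts, matched) e =
        (lastN m (seenM ++ [dget e "module" "?"]),
         (if PySem.Str.isIn (dget e "error" "") pat then lastN m seenM else []).foldl
           (fun d x => d.modify x 0 (· + 1)) counts,
         matched || PySem.Str.isIn (dget e "error" "") pat) := by
      unfold bStep
      simp only []
      rw [← lastN_snoc]
      refine Prod.ext rfl (Prod.ext ?_ rfl)
      show (if PySem.Str.isIn (dget e "error" "") pat then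
          (lastN m seenM).foldl (fun d x => d.modify x 0 (· + 1)) counts else counts) = _
      split <;> rfl
    rw [hstep, ih]
    simp only [prec]
    rw [List.foldl_append]
    simp [List.append_assoc, Bool.or_assoc]


theorem enum_filter_nil {E : Type} (flag : E → Bool) :
    ∀ (l : List E) (s : Int),
    (((PySem.List.enumerate l s).filter (fun p => flag p.2)).isEmpty = !(l.any flag)) := by
  intro l
  induction l with
  | nil => intro s; simp [PySem.List.enumerate]
  | cons e rest ih =>
    intro s
    simp only [PySem.List.enumerate, List.any_cons]
    by_cases hf : flag e
    · rw [List.filter_cons_of_pos (by simpa using hf)]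
      simp [hf]
    · rw [List.filter_cons_of_neg (by simp [hf])]
      simp [hf, ih]


theorem counter_items_nil (P : List String) :
    ((PySem.Dict.counter P).items.isEmpty = true) ↔ P = [] := by
  rw [PySem.Dict.items_counter]
  constructor
  · intro h
    rw [List.isEmpty_iff, List.map_eq_nil_iff] at h
    cases P with
    | nil => rfl
    | cons x t =>
      exfalso
      have : x ∈ PySem.Set.ofList (x :: t) := by
        rw [PySem.Set.mem_ofList]; simp
      rw [show ((PySem.Set.ofList (x :: t) : PySem.Set String) : List String) = ([] : List String) from h] at this
      simp at this
  · intro h; subst h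
    simp [PySem.Set.ofList]


theorem ports_agree (trace : List (List (String × String))) (error_pattern : String) (window : Int) :
    find_preceding_context_py trace error_pattern window = find_preceding_context_py_alt trace error_pattern window := by
  show _ = _
  simp only [find_preceding_context_py, find_preceding_context_py_alt]
  have hinit : (([] : List String), PySem.Dict.empty (κ := String) (ν := Int), false) =
      (lastN (max window 0).toNat [], PySem.Dict.empty, false) := by simp [lastN]
  rw [hinit, foldB error_pattern (max window 0).toNat trace [] PySem.Dict.empty false]
  have hA : (((PySem.List.enumerate trace).filter
        (fun p => PySem.Str.isIn (dget p.2 "error" "") error_pattern)).map (fun p => p.1)).foldl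
      (fun acc idx =>
        if idx > 0 then
          acc ++ (PySem.List.pyRange (max 0 (idx - window)) idx).map
            (fun i => dget (PySem.List.pyGetD trace i []) "module" "?")
        else acc) [] =
      prec (fun e => PySem.Str.isIn (dget e "error" "") error_pattern) (fun e => dget e "module" "?")
        (max window 0).toNat [] trace := by
    have hbody : (fun (acc : List String) (idx : Int) =>
        if idx > 0 then
          acc ++ (PySem.List.pyRange (max 0 (idx - window)) idx).map
            (fun i => dget (PySem.List.pyGetD trace i []) "module" "?")
        else acc) =
        (fun acc idx => acc ++ (if idx > 0 then
          (PySem.List.pyRange (max 0 (idx - window)) idx).map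
            (fun i => dget (PySem.List.pyGetD trace i []) "module" "?") else [])) := by
      funext acc idx; split <;> simp
    rw [hbody, PySem.List.foldl_append_eq_flatMap, List.flatMap_map, List.nil_append]
    simpa using foldA (fun e => PySem.Str.isIn (dget e "error" "") error_pattern)
      (fun e => dget e "module" "?") [] window trace trace [] rfl
  rw [hA]
  rw [← PySem.Dict.counter_eq_foldl]
  simp only [Bool.false_or]
  by_cases hany : trace.any (fun e => PySem.Str.isIn (dget e "error" "") error_pattern)
  · rw [if_neg (by simp only [List.isEmpty_map]; rw [enum_filter_nil (fun e => PySem.Str.isIn (dget e "error" "") error_pattern) trace 0]; rw [hany]; decide), hany]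
    simp only [Bool.not_true, Bool.false_eq_true, if_false]
    by_cases hP : prec (fun e => PySem.Str.isIn (dget e "error" "") error_pattern)
        (fun e => dget e "module" "?") (max window 0).toNat [] trace = []
    · rw [if_pos (by rw [hP]; rfl), if_pos (by rw [counter_items_nil]; exact hP)]
    · rw [if_neg (by rw [List.isEmpty_iff]; exact hP),
        if_neg (by rw [counter_items_nil]; exact hP)]
  · rw [Bool.not_eq_true] at hany
    rw [if_pos (by simp only [List.isEmpty_map]; rw [enum_filter_nil (fun e => PySem.Str.isIn (dget e "error" "") error_pattern) trace 0]; rw [hany]; decide), hany]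
    rfl

-- ===== VERDICT (by name: the statement is the Claim_ definition above) =====
theorem find_preceding_context_py_spec : Claim_equal_find_preceding_context_py := by
  intro trace error_pattern window _
  unfold Spec_find_preceding_context_py
  exact ports_agree trace error_pattern window
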